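-- pv_equiv track=rewrite | github.com/lucianoandrade1/HackerRanck-Python-3-Challenges | Algorithms - Warmup - Mini-Max Sum.py | miniMaxSum
-- ===== SOURCE A (Python) =====
-- def twoPowerNComb(items):
--
--     N = len(items)
--     # enumerate the 2**N possible combinations
--     for i in range(2**N):
--         comb = []
--         for j in range(N):
--             # test bit jth of integer i
--             if (i >> j) % 2 == 1:
--                 comb.append(items[j])
--         yield comb
--
-- def miniMaxSum(arr):
--     # Write your code here
--
--     #in this case it will return the combinations with 4 elements
--     n=4
--     arrComb = []
--     for i in twoPowerNComb(arr):
--         if len(i)==n: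
--             arrComb.append(i)
--
--     s = []
--     for i in arrComb:
--         s.append(sum(i))
--
--     return min(s), max(s)
-- ===== SOURCE B (Python) =====
-- def miniMaxSum(arr):
--     a = sorted(arr)
--     return (sum(a[:4]), sum(a[-4:]))
-- ===== Notes on version B (the rewrite author's own statement) =====
-- stated objective: faster
-- what changed: Replaces the exponential enumeration of all 2^N bitmask combinations (keeping those of length 4 and taking min/max of their sums) by sort-then-slice: sum of the 4 smallest and the 4 largest elements.
import Mathlib
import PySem

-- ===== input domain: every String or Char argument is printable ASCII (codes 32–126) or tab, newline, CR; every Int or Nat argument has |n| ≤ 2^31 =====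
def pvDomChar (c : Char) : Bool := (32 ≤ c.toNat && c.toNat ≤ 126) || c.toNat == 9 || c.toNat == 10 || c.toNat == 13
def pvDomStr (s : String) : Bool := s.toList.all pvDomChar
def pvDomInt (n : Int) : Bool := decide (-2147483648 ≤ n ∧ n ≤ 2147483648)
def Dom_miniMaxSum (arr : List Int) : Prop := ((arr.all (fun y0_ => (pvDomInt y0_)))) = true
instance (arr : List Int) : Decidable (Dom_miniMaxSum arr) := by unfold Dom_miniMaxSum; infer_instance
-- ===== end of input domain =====

-- B replaces A's exponential bitmask enumeration of all subsets by sort-then-slice (sum of the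
-- 4 smallest / 4 largest elements); objective: faster (asymptotic, O(2^N·N) -> O(N log N)).

-- ===== PORT A =====
-- generator twoPowerNComb, consumed eagerly: the list of combs yielded for i = 0 .. 2^N - 1.
-- 'items[j]' with 0 ≤ j < N is always in range, so pyGetD with default 0 is exact here;
-- '(i >> j) % 2 == 1' on the nonnegative i, j is exactly Nat '>>>' and '% 2'.
def twoPowerNComb (items : List Int) : List (List Int) :=
  let N := items.length
  (List.range (2 ^ N)).map (fun i =>
    (List.range N).foldl (fun comb j =>
      if (i >>> j) % 2 = 1 then comb ++ [PySem.List.pyGetD items (Int.ofNat j) 0] else comb) [])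

def miniMaxSum (arr : List Int) : Int × Int :=
  let n : Nat := 4
  let arrComb := (twoPowerNComb arr).foldl
    (fun acc i => if i.length = n then acc ++ [i] else acc) []
  let s := arrComb.foldl (fun acc i => acc ++ [i.sum]) []
  -- Python min/max of a list raise ValueError when s is empty (len(arr) < 4): excluded by Pre_.
  ((PySem.List.min? s (fun x => x)).getD 0, (PySem.List.max? s (fun x => x)).getD 0)

-- ===== PORT B =====
def miniMaxSum_alt (arr : List Int) : Int × Int :=
  let a := PySem.List.sorted arr (fun x => x) false
  ((PySem.List.slice a none (some 4)).sum, (PySem.List.slice a (some (-4)) none).sum)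

-- ===== PRECONDITION & SPEC =====
-- Pre_ excludes lists with fewer than 4 elements, on which A raises ValueError (min()/max() of
-- an empty sequence: there is no 4-element combination).
def Pre_miniMaxSum (arr : List Int) : Prop := 4 ≤ arr.length
instance (arr : List Int) : Decidable (Pre_miniMaxSum arr) := by unfold Pre_miniMaxSum; infer_instance
def pvWitness_miniMaxSum : List Int := ([1, 2, 3, 4, 5])

def Spec_miniMaxSum (arr : List Int) (out : Int × Int) : Prop := out = miniMaxSum_alt arr
instance (arr : List Int) (out : Int × Int) : Decidable (Spec_miniMaxSum arr out) := by unfold Spec_miniMaxSum; infer_instance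

-- ===== CLAIM (what is proved, stated in full; the proofs are below) =====
def Claim_equal_miniMaxSum : Prop := ∀ (arr : List Int), Dom_miniMaxSum arr → Pre_miniMaxSum arr → Spec_miniMaxSum arr (miniMaxSum arr)

-- ===== LEMMAS AND PROOFS =====

-- pvSel m l: the elements of l whose position's bit is set in m — what A's inner loop builds.
def pvSel (m : Nat) : List Int → List Int
  | [] => []
  | a :: l => if m % 2 = 1 then a :: pvSel (m / 2) l else pvSel (m / 2) l

theorem pvSel_append (m : Nat) (l : List Int) (a : Int) :
    pvSel m (l ++ [a]) = pvSel m l ++ (if (m >>> l.length) % 2 = 1 then [a] else []) := by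
  induction l generalizing m with
  | nil => simp [pvSel, Nat.shiftRight_zero]
  | cons b l ih =>
      simp only [List.cons_append, pvSel, ih (m / 2), List.length_cons]
      have h1 : m >>> (l.length + 1) = (m / 2) >>> l.length := by
        rw [Nat.add_comm, Nat.shiftRight_add, Nat.shiftRight_one]
      simp only [h1]
      split <;> simp

theorem pv_foldl_congr {α : Type} (l : List α) (f g : List Int → α → List Int)
    (h : ∀ acc j, j ∈ l → f acc j = g acc j) (init : List Int) :
    l.foldl f init = l.foldl g init := by
  induction l generalizing init with
  | nil => rfl
  | cons x l ih =>
      simp only [List.foldl_cons]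
      rw [h init x (by simp)]
      exact ih (fun acc j hj => h acc j (by simp [hj])) _

theorem pv_fold_eq_sel (l : List Int) (i : Nat) :
    (List.range l.length).foldl (fun comb j =>
      if (i >>> j) % 2 = 1 then comb ++ [PySem.List.pyGetD l (Int.ofNat j) 0] else comb) []
    = pvSel i l := by
  induction l using List.reverseRecOn with
  | nil => simp [pvSel]
  | append_singleton l a ih =>
      rw [List.length_append, List.length_singleton, List.range_succ, List.foldl_append]
      have hcongr : (List.range l.length).foldl (fun comb j =>
          if (i >>> j) % 2 = 1 then comb ++ [PySem.List.pyGetD (l ++ [a]) (Int.ofNat j) 0] else comb) []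
          = (List.range l.length).foldl (fun comb j =>
          if (i >>> j) % 2 = 1 then comb ++ [PySem.List.pyGetD l (Int.ofNat j) 0] else comb) [] := by
        apply pv_foldl_congr
        intro acc j hj
        have hj' : j < l.length := List.mem_range.mp hj
        have heq : PySem.List.pyGetD (l ++ [a]) (Int.ofNat j) 0 = PySem.List.pyGetD l (Int.ofNat j) 0 := by
          simp [PySem.List.pyGetD_natCast, List.getD, List.getElem?_append_left hj']
        rw [heq]
      rw [hcongr, ih, pvSel_append]
      have heq2 : PySem.List.pyGetD (l ++ [a]) (Int.ofNat l.length) 0 = a := by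
        simp [PySem.List.pyGetD_natCast, List.getD]
      simp only [List.foldl_cons, List.foldl_nil, heq2]
      split <;> simp

theorem pv_twoPowerNComb_eq (arr : List Int) :
    twoPowerNComb arr = (List.range (2 ^ arr.length)).map (fun i => pvSel i arr) := by
  unfold twoPowerNComb
  exact List.map_congr_left (fun i _ => pv_fold_eq_sel arr i)

theorem pvSel_sublist (m : Nat) (l : List Int) : (pvSel m l).Sublist l := by
  induction l generalizing m with
  | nil => simp [pvSel]
  | cons a l ih =>
      simp only [pvSel]
      split
      · exact (ih (m / 2)).cons₂ a
      · exact (ih (m / 2)).cons a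

theorem pv_exists_sel {t l : List Int} (h : t.Sublist l) :
    ∃ m, m < 2 ^ l.length ∧ pvSel m l = t := by
  induction h with
  | slnil => exact ⟨0, by simp [pvSel]⟩
  | cons a h ih =>
      obtain ⟨m, hm, hsel⟩ := ih
      refine ⟨2 * m, ?_, ?_⟩
      · rw [List.length_cons, pow_succ]; omega
      · simp [pvSel, Nat.mul_div_cancel_left m (by norm_num : 0 < 2), hsel, Nat.mul_mod_right]
  | cons₂ a h ih =>
      obtain ⟨m, hm, hsel⟩ := ih
      refine ⟨2 * m + 1, ?_, ?_⟩
      · rw [List.length_cons, pow_succ]; omega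
      · have h2 : (2 * m + 1) % 2 = 1 := by omega
        have h3 : (2 * m + 1) / 2 = m := by omega
        simp [pvSel, h2, h3, hsel]

theorem pv_foldl_if (l : List (List Int)) (acc : List (List Int)) :
    l.foldl (fun acc i => if i.length = (4:Nat) then acc ++ [i] else acc) acc
      = acc ++ l.filter (fun i => decide (i.length = 4)) := by
  induction l generalizing acc with
  | nil => simp
  | cons x l ih =>
      simp only [List.foldl_cons, List.filter_cons]
      by_cases hx : x.length = 4
      · simp [hx, ih]
      · simp [hx, ih]

theorem pv_foldl_map (l : List (List Int)) (acc : List Int) :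
    l.foldl (fun acc i => acc ++ [i.sum]) acc = acc ++ l.map List.sum := by
  induction l generalizing acc with
  | nil => simp
  | cons x l ih => simp [ih]

-- membership in the list A's min/max range over
theorem pv_mem_s_iff (arr : List Int) (x : Int) :
    (x ∈ ((twoPowerNComb arr).foldl
        (fun acc i => if i.length = (4:Nat) then acc ++ [i] else acc) []).foldl
        (fun acc i => acc ++ [i.sum]) [])
      ↔ ∃ t : List Int, t.Sublist arr ∧ t.length = 4 ∧ t.sum = x := by
  rw [pv_foldl_if, pv_foldl_map]
  simp only [List.nil_append, List.mem_map, List.mem_filter, pv_twoPowerNComb_eq, List.mem_range,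
    decide_eq_true_eq]
  constructor
  · rintro ⟨t, ⟨⟨m, _, rfl⟩, hlen⟩, rfl⟩
    exact ⟨pvSel m arr, pvSel_sublist m arr, hlen, rfl⟩
  · rintro ⟨t, hsub, hlen, rfl⟩
    obtain ⟨m, hm, hsel⟩ := pv_exists_sel hsub
    exact ⟨t, ⟨⟨m, hm, hsel⟩, hlen⟩, rfl⟩

-- sum of the first k of a sorted list is ≤ the sum of any sublist of length k
theorem pv_sum_take_le {u v : List Int} (h : u.Sublist v) (hv : v.Pairwise (· ≤ ·)) :
    (v.take u.length).sum ≤ u.sum := by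
  induction h with
  | slnil => simp
  | cons a h ih =>
      rename_i u v
      have hv' : v.Pairwise (· ≤ ·) := List.Pairwise.of_cons hv
      have ha : ∀ x ∈ v, a ≤ x := (List.pairwise_cons.mp hv).1
      cases u with
      | nil => simp
      | cons b u' =>
          have hlen : u'.length + 1 ≤ v.length := by
            have := h.length_le; simpa using this
          have htake : v.take (u'.length + 1) = v.take u'.length ++ [v[u'.length]] := by
            rw [List.take_add_one, List.getElem?_eq_getElem (by omega)]
            simp
          have hmem : v[u'.length] ∈ v := List.getElem_mem _
          have hih := ih hv'
          simp only [List.length_cons, htake, List.take_succ_cons, List.sum_cons,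
            List.sum_append, List.sum_cons, List.sum_nil] at hih ⊢
          have hav := ha _ hmem
          omega
  | cons₂ a h ih =>
      have hv' := List.Pairwise.of_cons hv
      simp only [List.length_cons, List.take_succ_cons, List.sum_cons]
      have := ih hv'
      omega

theorem pv_sum_map_neg (w : List Int) : (w.map (fun x : Int => -x)).sum = -w.sum := by
  induction w with
  | nil => simp
  | cons a w ih => simp [ih]; ring

-- dual: the sum of any sublist of length k is ≤ the sum of the last k of a sorted list
theorem pv_sum_le_drop {u v : List Int} (h : u.Sublist v) (hv : v.Pairwise (· ≤ ·)) :
    u.sum ≤ (v.drop (v.length - u.length)).sum := by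
  have hneg : (u.reverse.map (fun x : Int => -x)).Sublist (v.reverse.map (fun x : Int => -x)) :=
    (h.reverse).map _
  have hvneg : (v.reverse.map (fun x : Int => -x)).Pairwise (· ≤ ·) := by
    rw [List.pairwise_map, List.pairwise_reverse]
    exact hv.imp (fun hab => by omega)
  have hmain := pv_sum_take_le hneg hvneg
  have hlen : (u.reverse.map (fun x : Int => -x)).length = u.length := by simp
  have hrev : List.take u.length v.reverse = (List.drop (v.length - u.length) v).reverse := by
    rw [List.reverse_drop]
    congr 1
    have := h.length_le
    omega
  rw [hlen, ← List.map_take, hrev] at hmain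
  rw [pv_sum_map_neg, pv_sum_map_neg, List.sum_reverse, List.sum_reverse] at hmain
  omega

theorem pv_min_eq (s : List Int) (m x : Int) (hm : PySem.List.min? s (fun y => y) = some m)
    (hx : x ∈ s) (hle : ∀ y ∈ s, x ≤ y) : m = x :=
  le_antisymm (PySem.List.min?_isMin hm x hx) (hle m (PySem.List.min?_mem hm))

theorem pv_max_eq (s : List Int) (m x : Int) (hm : PySem.List.max? s (fun y => y) = some m)
    (hx : x ∈ s) (hge : ∀ y ∈ s, y ≤ x) : m = x :=
  le_antisymm (hge m (PySem.List.max?_mem hm)) (PySem.List.max?_isMax hm x hx)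

-- ===== VERDICT (by name: the statement is the Claim_ definition above) =====
theorem miniMaxSum_spec : Claim_equal_miniMaxSum := by
  intro arr _ hpre
  unfold Spec_miniMaxSum miniMaxSum miniMaxSum_alt
  dsimp only
  have hN : 4 ≤ arr.length := hpre
  set a := PySem.List.sorted arr (fun x => x) false with ha
  set s := ((twoPowerNComb arr).foldl
      (fun acc i => if i.length = (4:Nat) then acc ++ [i] else acc) []).foldl
      (fun acc i => acc ++ [i.sum]) [] with hs
  have hlen_a : a.length = arr.length := PySem.List.length_sorted ..
  have hperm : a.Perm arr := PySem.List.sorted_perm ..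
  have hpair : a.Pairwise (· ≤ ·) := by
    have := PySem.List.sorted_pairwise arr (fun x : Int => x)
    simpa using this
  -- B's two slices
  have hslice1 : PySem.List.slice a none (some 4) = a.take 4 := by
    rw [PySem.List.slice_to a (by norm_num)]; rfl
  have hslice2 : PySem.List.slice a (some (-4)) none = a.drop (a.length - 4) :=
    PySem.List.slice_from_neg_ofNat a 4 (by norm_num)
  -- the two optimal sublists of a are (up to permutation) 4-element sublists of arr
  have hsubperm : ∀ {t : List Int}, t.Sublist a → ∃ t' : List Int, t'.Perm t ∧ t'.Sublist arr := by
    intro t ht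
    rcases ht.subperm.trans hperm.subperm with ⟨t', hp, hsb⟩
    exact ⟨t', hp, hsb⟩
  obtain ⟨tmin, htminp, htmins⟩ := hsubperm (List.take_sublist 4 a)
  obtain ⟨tmax, htmaxp, htmaxs⟩ := hsubperm (List.drop_sublist (a.length - 4) a)
  have htmin_len : tmin.length = 4 := by
    rw [htminp.length_eq, List.length_take]; omega
  have htmax_len : tmax.length = 4 := by
    rw [htmaxp.length_eq, List.length_drop]; omega
  -- membership of the optimal sums in s
  have hmin_mem : (a.take 4).sum ∈ s :=
    (pv_mem_s_iff arr _).mpr ⟨tmin, htmins, htmin_len, htminp.sum_eq⟩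
  have hmax_mem : (a.drop (a.length - 4)).sum ∈ s :=
    (pv_mem_s_iff arr _).mpr ⟨tmax, htmaxs, htmax_len, htmaxp.sum_eq⟩
  -- bounds for every element of s
  have hbounds : ∀ y ∈ s, (a.take 4).sum ≤ y ∧ y ≤ (a.drop (a.length - 4)).sum := by
    intro y hy
    obtain ⟨t, hts, htl, rfl⟩ := (pv_mem_s_iff arr y).mp hy
    rcases hts.subperm.trans hperm.symm.subperm with ⟨u, hup, hus⟩
    have hul : u.length = 4 := by rw [hup.length_eq, htl]
    have h1 := pv_sum_take_le hus hpair
    have h2 := pv_sum_le_drop hus hpair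
    rw [hul, hup.sum_eq] at h1 h2
    exact ⟨h1, h2⟩
  -- min? and max? of s are exactly B's two sums
  rcases hmn : PySem.List.min? s (fun x => x) with _ | m
  · exact absurd (((PySem.List.min?_eq_none_iff s _).mp hmn) ▸ hmin_mem) (List.not_mem_nil)
  rcases hmx : PySem.List.max? s (fun x => x) with _ | M
  · exact absurd (((PySem.List.max?_eq_none_iff s _).mp hmx) ▸ hmax_mem) (List.not_mem_nil)
  have hm : m = (a.take 4).sum :=
    pv_min_eq s m _ hmn hmin_mem (fun y hy => (hbounds y hy).1)
  have hM : M = (a.drop (a.length - 4)).sum :=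
    pv_max_eq s M _ hmx hmax_mem (fun y hy => (hbounds y hy).2)
  rw [hslice1, hslice2, hm, hM]
  rfl
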